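-- pv_equiv track=rewrite | github.com/ioteverythin/OpenDocs | src/opendocs/docagent/skills/model_builder.py | _infer_users
-- ===== SOURCE A (Python) =====
-- def _infer_users(readme: str, tech_stack: list[str]) -> list[str]:
--     """Infer target users from readme and tech stack."""
--     users: list[str] = []
--     if any(t in tech_stack for t in ("React", "Vue.js", "Angular", "Next.js")):
--         users.append("Frontend developers")
--     if any(t in tech_stack for t in ("FastAPI", "Flask", "Django", "Express.js", "NestJS")):
--         users.append("Backend developers")
--     if any(t in tech_stack for t in ("PyTorch", "TensorFlow", "Hugging Face Transformers")):
--         users.append("ML/AI engineers")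
--     if any(t in tech_stack for t in ("Docker", "Kubernetes", "Terraform")):
--         users.append("DevOps engineers")
--     if not users:
--         users.append("Software developers")
--     return users
-- ===== SOURCE B (Python) =====
-- _KEYWORD_TO_LABEL = {
--     "React": "Frontend developers",
--     "Vue.js": "Frontend developers",
--     "Angular": "Frontend developers",
--     "Next.js": "Frontend developers",
--     "FastAPI": "Backend developers",
--     "Flask": "Backend developers",
--     "Django": "Backend developers",
--     "Express.js": "Backend developers",
--     "NestJS": "Backend developers",
--     "PyTorch": "ML/AI engineers",
--     "TensorFlow": "ML/AI engineers",
--     "Hugging Face Transformers": "ML/AI engineers",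
--     "Docker": "DevOps engineers",
--     "Kubernetes": "DevOps engineers",
--     "Terraform": "DevOps engineers",
-- }
--
-- _LABEL_ORDER = ("Frontend developers", "Backend developers",
--                 "ML/AI engineers", "DevOps engineers")
--
--
-- def _infer_users(readme: str, tech_stack: list[str]) -> list[str]:
--     """Infer target users: one pass over tech_stack through an inverted
--     keyword->label index, then emit the found labels in canonical order."""
--     found = set()
--     for t in tech_stack:
--         label = _KEYWORD_TO_LABEL.get(t)
--         if label is not None:
--             found.add(label)
--     users = [label for label in _LABEL_ORDER if label in found]
--     return users or ["Software developers"]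
-- ===== Notes on version B (the rewrite author's own statement) =====
-- stated objective: idiomatic
-- what changed: Inverts the traversal: instead of four rule-wise any-scans over tech_stack, B makes a single pass over tech_stack through an inverted keyword-to-label dictionary, collects the hit labels in a set, and then emits the labels in canonical order (default if none).
import Mathlib
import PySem

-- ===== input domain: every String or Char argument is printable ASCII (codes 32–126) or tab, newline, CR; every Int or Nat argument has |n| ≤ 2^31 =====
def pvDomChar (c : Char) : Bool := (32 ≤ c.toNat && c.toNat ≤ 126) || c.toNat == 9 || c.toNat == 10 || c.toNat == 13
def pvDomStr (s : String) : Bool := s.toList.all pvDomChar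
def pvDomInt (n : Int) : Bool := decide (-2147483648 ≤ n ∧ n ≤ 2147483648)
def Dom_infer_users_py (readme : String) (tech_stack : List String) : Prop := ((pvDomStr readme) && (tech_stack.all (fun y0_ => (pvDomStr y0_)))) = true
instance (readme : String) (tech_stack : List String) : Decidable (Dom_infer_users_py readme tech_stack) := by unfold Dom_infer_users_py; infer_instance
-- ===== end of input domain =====

-- B inverts the traversal: one pass over tech_stack through a keyword→label index collecting
-- hit labels in a set, then the labels are emitted in canonical order (objective: idiomatic).

-- ===== PORT A =====
def infer_users_py (readme : String) (tech_stack : List String) : List String :=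
  let users : List String := []
  let users := if ["React", "Vue.js", "Angular", "Next.js"].any (fun t => tech_stack.contains t)
    then users ++ ["Frontend developers"] else users
  let users := if ["FastAPI", "Flask", "Django", "Express.js", "NestJS"].any (fun t => tech_stack.contains t)
    then users ++ ["Backend developers"] else users
  let users := if ["PyTorch", "TensorFlow", "Hugging Face Transformers"].any (fun t => tech_stack.contains t)
    then users ++ ["ML/AI engineers"] else users
  let users := if ["Docker", "Kubernetes", "Terraform"].any (fun t => tech_stack.contains t)
    then users ++ ["DevOps engineers"] else users
  let users := if users.isEmpty then users ++ ["Software developers"] else users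
  users

-- ===== PORT B =====
def pvKeywordLabel : PySem.Dict String String := PySem.Dict.mk
  [("React", "Frontend developers"), ("Vue.js", "Frontend developers"),
   ("Angular", "Frontend developers"), ("Next.js", "Frontend developers"),
   ("FastAPI", "Backend developers"), ("Flask", "Backend developers"),
   ("Django", "Backend developers"), ("Express.js", "Backend developers"),
   ("NestJS", "Backend developers"),
   ("PyTorch", "ML/AI engineers"), ("TensorFlow", "ML/AI engineers"),
   ("Hugging Face Transformers", "ML/AI engineers"),
   ("Docker", "DevOps engineers"), ("Kubernetes", "DevOps engineers"),
   ("Terraform", "DevOps engineers")]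

def pvLabelOrder : List String :=
  ["Frontend developers", "Backend developers", "ML/AI engineers", "DevOps engineers"]

def infer_users_py_alt (readme : String) (tech_stack : List String) : List String :=
  let found : PySem.Set String := tech_stack.foldl (fun acc t =>
    match pvKeywordLabel.get? t with
    | some label => PySem.Set.add acc label
    | none => acc) PySem.Set.empty
  let users := pvLabelOrder.filter (fun label => found.contains label)
  if users.isEmpty then ["Software developers"] else users

-- ===== PRECONDITION & SPEC =====
def Spec_infer_users_py (readme : String) (tech_stack : List String) (out : List String) : Prop := out = infer_users_py_alt readme tech_stack
instance (readme : String) (tech_stack : List String) (out : List String) : Decidable (Spec_infer_users_py readme tech_stack out) := by unfold Spec_infer_users_py; infer_instance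

-- ===== CLAIM =====
def Claim_equal_infer_users_py : Prop := ∀ (readme : String) (tech_stack : List String), Dom_infer_users_py readme tech_stack → Spec_infer_users_py readme tech_stack (infer_users_py readme tech_stack)

-- ===== LEMMAS AND PROOFS =====

-- a label is in the set built by B's loop iff some element of tech_stack maps to it
theorem pv_found_mem (ts : List String) (acc : PySem.Set String) (L : String) :
    (L ∈ ts.foldl (fun acc t =>
      match pvKeywordLabel.get? t with
      | some label => PySem.Set.add acc label
      | none => acc) acc)
    ↔ (L ∈ acc ∨ ∃ t ∈ ts, pvKeywordLabel.get? t = some L) := by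
  induction ts generalizing acc with
  | nil => simp
  | cons t ts ih =>
    simp only [List.foldl_cons, List.mem_cons]
    cases h : pvKeywordLabel.get? t with
    | none =>
      rw [ih]
      constructor
      · rintro (hm | ⟨u, hu, hg⟩)
        · exact Or.inl hm
        · exact Or.inr ⟨u, Or.inr hu, hg⟩
      · rintro (hm | ⟨u, (rfl | hu), hg⟩)
        · exact Or.inl hm
        · rw [h] at hg; cases hg
        · exact Or.inr ⟨u, hu, hg⟩
    | some lab =>
      rw [ih]
      simp only [PySem.Set.mem_add]
      constructor
      · rintro ((hm | rfl) | ⟨u, hu, hg⟩)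
        · exact Or.inl hm
        · exact Or.inr ⟨t, Or.inl rfl, h⟩
        · exact Or.inr ⟨u, Or.inr hu, hg⟩
      · rintro (hm | ⟨u, (rfl | hu), hg⟩)
        · exact Or.inl (Or.inl hm)
        · rw [h] at hg; exact Or.inl (Or.inr (Option.some.injEq .. ▸ hg).symm)
        · exact Or.inr ⟨u, hu, hg⟩

-- the inverted index maps t to L exactly when t is one of L's keywords
theorem pv_get_frontend (t : String) :
    (pvKeywordLabel.get? t = some "Frontend developers")
    ↔ t ∈ (["React", "Vue.js", "Angular", "Next.js"] : List String) := by
  rw [PySem.Dict.get?_eq_some_iff_mem_items pvKeywordLabel t "Frontend developers" (by decide)]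
  simp [pvKeywordLabel, Prod.ext_iff]

theorem pv_get_backend (t : String) :
    (pvKeywordLabel.get? t = some "Backend developers")
    ↔ t ∈ (["FastAPI", "Flask", "Django", "Express.js", "NestJS"] : List String) := by
  rw [PySem.Dict.get?_eq_some_iff_mem_items pvKeywordLabel t "Backend developers" (by decide)]
  simp [pvKeywordLabel, Prod.ext_iff]

theorem pv_get_ml (t : String) :
    (pvKeywordLabel.get? t = some "ML/AI engineers")
    ↔ t ∈ (["PyTorch", "TensorFlow", "Hugging Face Transformers"] : List String) := by
  rw [PySem.Dict.get?_eq_some_iff_mem_items pvKeywordLabel t "ML/AI engineers" (by decide)]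
  simp [pvKeywordLabel, Prod.ext_iff]

theorem pv_get_devops (t : String) :
    (pvKeywordLabel.get? t = some "DevOps engineers")
    ↔ t ∈ (["Docker", "Kubernetes", "Terraform"] : List String) := by
  rw [PySem.Dict.get?_eq_some_iff_mem_items pvKeywordLabel t "DevOps engineers" (by decide)]
  simp [pvKeywordLabel, Prod.ext_iff]

-- B's set-membership test for a label agrees with A's any-scan for that label's keywords
theorem pv_found_eq_any (ts : List String) (L : String) (kws : List String)
    (hiff : ∀ t, pvKeywordLabel.get? t = some L ↔ t ∈ kws) :
    (PySem.Set.contains (ts.foldl (fun acc t =>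
      match pvKeywordLabel.get? t with
      | some label => PySem.Set.add acc label
      | none => acc) PySem.Set.empty) L)
    = (kws.any fun k => ts.contains k) := by
  rw [Bool.eq_iff_iff]
  simp only [PySem.Set.contains, List.contains_eq_mem, decide_eq_true_eq, List.any_eq_true,
    pv_found_mem, PySem.Set.empty, List.not_mem_nil, false_or]
  constructor
  · rintro ⟨t, ht, hg⟩; exact ⟨t, (hiff t).mp hg, ht⟩
  · rintro ⟨k, hk, hk2⟩; exact ⟨k, hk2, (hiff k).mpr hk⟩

-- ===== VERDICT =====
theorem infer_users_py_spec : Claim_equal_infer_users_py := by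
  intro readme ts _
  unfold Spec_infer_users_py infer_users_py infer_users_py_alt pvLabelOrder
  simp only [List.filter,
    pv_found_eq_any ts "Frontend developers" _ pv_get_frontend,
    pv_found_eq_any ts "Backend developers" _ pv_get_backend,
    pv_found_eq_any ts "ML/AI engineers" _ pv_get_ml,
    pv_found_eq_any ts "DevOps engineers" _ pv_get_devops]
  cases h1 : (["React", "Vue.js", "Angular", "Next.js"].any fun k => ts.contains k) <;>
  cases h2 : (["FastAPI", "Flask", "Django", "Express.js", "NestJS"].any fun k => ts.contains k) <;>
  cases h3 : (["PyTorch", "TensorFlow", "Hugging Face Transformers"].any fun k => ts.contains k) <;>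
  cases h4 : (["Docker", "Kubernetes", "Terraform"].any fun k => ts.contains k) <;>
  simp_all
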